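-- pv_equiv track=rewrite | github.com/Dancesoul/leetcodebywhy | Solutions.py | numSmallerByFrequency
-- ===== SOURCE A (Python) =====
-- from typing import List
--
-- def numSmallerByFrequency(queries: List[str], words: List[str]) -> List[int]:
--     #1170
--     def f(s: str):
--         s=sorted(s)
--         return s.count(s[0])
--     lib=[f(s) for s in words]
--     res=[0 for _ in queries]
--     for i,q in enumerate(queries):
--         q=f(q)
--         for l in lib:
--             if q<l:
--                 res[i]+=1
--     return res
-- ===== SOURCE B (Python) =====
-- from typing import List
--
-- def numSmallerByFrequency(queries: List[str], words: List[str]) -> List[int]: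
--     # B: sort the word frequencies once, answer each query by binary search
--     # (count of lib values > fq = n - upper_bound(fq)).
--     def f(s):
--         m = min(s)
--         c = 0
--         for ch in s:
--             if ch == m:
--                 c += 1
--         return c
--     lib = sorted(f(w) for w in words)
--     n = len(lib)
--     def upper(x):
--         lo, hi = 0, n
--         while lo < hi:
--             mid = (lo + hi) // 2
--             if lib[mid] <= x:
--                 lo = mid + 1
--             else:
--                 hi = mid
--         return lo
--     return [n - upper(f(q)) for q in queries]
-- ===== Notes on version B (the rewrite author's own statement) =====
-- stated objective: faster
-- what changed: B computes each word's min-char frequency with min()+a counting loop instead of sorting the string, sorts the frequency list once, and answers each query with a hand-written binary search (n - upper_bound) instead of A's linear scan over all words per query.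
import Mathlib
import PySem

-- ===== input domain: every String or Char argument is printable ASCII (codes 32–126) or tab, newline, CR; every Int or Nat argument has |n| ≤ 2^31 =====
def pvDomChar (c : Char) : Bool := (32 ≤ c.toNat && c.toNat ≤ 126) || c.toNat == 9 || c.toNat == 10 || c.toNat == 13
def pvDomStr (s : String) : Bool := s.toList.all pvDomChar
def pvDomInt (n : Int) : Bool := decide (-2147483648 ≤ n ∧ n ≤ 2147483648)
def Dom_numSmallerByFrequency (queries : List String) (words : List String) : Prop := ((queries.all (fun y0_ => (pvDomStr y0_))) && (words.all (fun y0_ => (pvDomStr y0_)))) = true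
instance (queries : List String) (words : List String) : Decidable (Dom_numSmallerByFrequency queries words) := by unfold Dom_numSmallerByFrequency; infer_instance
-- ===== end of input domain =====

-- B sorts the word frequencies once and answers each query by hand-written binary search
-- (objective: faster — O((Q+W)·log W) instead of A's O(Q·W)).


-- ===== PORT A =====
-- f(s): s = sorted(s); return s.count(s[0]).  s[0] raises IndexError on the empty
-- string (excluded by Pre_); the total port returns 0 there.
def pvFA (s : String) : Int :=
  let l := PySem.List.sorted s.toList (fun c => c) false
  match PySem.List.pyGet? l 0 with
  | some c => (PySem.List.count l c : Int)
  | none => 0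

def numSmallerByFrequency (queries : List String) (words : List String) : List Int :=
  let lib := words.map pvFA
  queries.map (fun q =>
    let fq := pvFA q
    lib.foldl (fun acc l => if fq < l then acc + 1 else acc) (0 : Int))

-- ===== PORT B =====
-- f(s): m = min(s) (ValueError on the empty string, excluded by Pre_; total port
-- returns 0 there), then count characters equal to m with an accumulator loop.
def pvFB (s : String) : Int :=
  match PySem.List.min? s.toList (fun c => c) with
  | some m => s.toList.foldl (fun acc ch => if ch == m then acc + 1 else acc) (0 : Int)
  | none => 0

-- the while-loop of B's `upper` (binary search for the first index with lib[mid] > x).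
-- `lib[mid]` is always in range (lo < hi ≤ len), so the total getD is exact here.
def pvUpper (lib : List Int) (x : Int) (lo hi : Nat) : Nat :=
  if _h : lo < hi then
    let mid := (lo + hi) / 2
    if lib.getD mid 0 ≤ x then pvUpper lib x (mid + 1) hi else pvUpper lib x lo mid
  else lo
termination_by hi - lo
decreasing_by all_goals omega

def numSmallerByFrequency_alt (queries : List String) (words : List String) : List Int :=
  let lib := PySem.List.sorted (words.map pvFB) (fun v => v) false
  let n := lib.length
  queries.map (fun q => (n : Int) - (pvUpper lib (pvFB q) 0 n : Int))

-- ===== PRECONDITION & SPEC =====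
-- Pre_ excludes exactly the inputs where Python A raises: an empty string anywhere
-- (IndexError on s[0] in A's f; B's min(s) raises there too).
def Pre_numSmallerByFrequency (queries : List String) (words : List String) : Prop :=
  (∀ q ∈ queries, q.toList ≠ []) ∧ (∀ w ∈ words, w.toList ≠ [])
instance (queries : List String) (words : List String) : Decidable (Pre_numSmallerByFrequency queries words) := by unfold Pre_numSmallerByFrequency; infer_instance
def pvWitness_numSmallerByFrequency : List String × List String := (["ab", "zz"], ["a", "bbc"])

def Spec_numSmallerByFrequency (queries : List String) (words : List String) (out : List Int) : Prop := out = numSmallerByFrequency_alt queries words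
instance (queries : List String) (words : List String) (out : List Int) : Decidable (Spec_numSmallerByFrequency queries words out) := by unfold Spec_numSmallerByFrequency; infer_instance

-- ===== CLAIM (what is proved, stated in full; the proofs are below) =====
def Claim_equal_numSmallerByFrequency : Prop := ∀ (queries : List String) (words : List String), Dom_numSmallerByFrequency queries words → Pre_numSmallerByFrequency queries words → Spec_numSmallerByFrequency queries words (numSmallerByFrequency queries words)

-- ===== LEMMAS AND PROOFS =====

-- A's f and B's f agree on every string: the head of sorted(s) is the first minimum,
-- and counting it in sorted(s) equals counting it in s (permutation).
lemma pvFA_eq_pvFB (s : String) : pvFA s = pvFB s := by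
  unfold pvFA pvFB
  rcases h : PySem.List.sorted s.toList (fun c => c) false with _ | ⟨m, t⟩
  · have hnil : s.toList = [] := (PySem.List.sorted_eq_nil_iff _ _ _).mp h
    rw [hnil]
    cases PySem.List.min? ([] : List Char) (fun c => c) <;> rfl
  · have hne : s.toList ≠ [] := by
      intro hn
      rw [hn] at h; simp [PySem.List.sorted] at h
    rcases hm' : PySem.List.min? s.toList (fun c => c) with _ | m'
    · exact absurd ((PySem.List.min?_eq_none_iff _ _).mp hm') hne
    · have hperm : (m :: t).Perm s.toList := h ▸ PySem.List.sorted_perm s.toList _ _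
      have hmmem : m ∈ s.toList := hperm.mem_iff.mp (List.mem_cons_self)
      have hm'mem : m' ∈ s.toList := PySem.List.min?_mem hm'
      have h1 : m ≤ m' := PySem.List.key_head_sorted_le s.toList (fun c => c) h m' hm'mem
      have h2 : m' ≤ m := PySem.List.min?_isMin hm' m hmmem
      have hmm : m = m' := le_antisymm h1 h2
      have hget : PySem.List.pyGet? (m :: t) 0 = some m := by
        simp [PySem.List.pyGet?, PySem.List.pyIdx?]
      simp only [hget, PySem.List.foldl_beq_add_one, PySem.List.count]
      rw [hmm, (hmm ▸ hperm : (m' :: t).Perm s.toList).count_eq]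
      omega

-- splitting characterisation: if everything before r satisfies (≤ x) and everything
-- from r on does not, then countP (≤ x) = r.
lemma countP_eq_of_split (lib : List Int) (x : Int) (r : Nat) (hr : r ≤ lib.length)
    (h1 : ∀ i, i < r → lib.getD i 0 ≤ x)
    (h2 : ∀ i, r ≤ i → i < lib.length → x < lib.getD i 0) :
    lib.countP (fun v => v ≤ x) = r := by
  conv_lhs => rw [← List.take_append_drop r lib]
  rw [List.countP_append]
  have ht : (lib.take r).countP (fun v => v ≤ x) = (lib.take r).length := by
    apply List.countP_eq_length.mpr
    intro a ha
    rcases List.mem_iff_getElem.mp ha with ⟨j, hj, rfl⟩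
    have hjr : j < r := by rw [List.length_take] at hj; omega
    have hjl : j < lib.length := lt_of_lt_of_le hjr hr
    have := h1 j hjr
    rw [List.getD_eq_getElem lib 0 hjl] at this
    simpa [List.getElem_take] using this
  have hd : (lib.drop r).countP (fun v => v ≤ x) = 0 := by
    apply List.countP_eq_zero.mpr
    intro a ha
    rcases List.mem_iff_getElem.mp ha with ⟨j, hj, rfl⟩
    have hjl : r + j < lib.length := by rw [List.length_drop] at hj; omega
    have := h2 (r + j) (Nat.le_add_right r j) hjl
    rw [List.getD_eq_getElem lib 0 hjl] at this
    simp [List.getElem_drop]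
    omega
  rw [ht, hd, List.length_take]
  omega

-- correctness of B's binary search on a sorted list: it returns the number of
-- elements ≤ x, given the loop invariant on [lo, hi).
lemma pvUpper_eq (lib : List Int) (x : Int) (hs : lib.Pairwise (· ≤ ·)) :
    ∀ fuel lo hi, hi - lo ≤ fuel → lo ≤ hi → hi ≤ lib.length →
    (∀ i, i < lo → lib.getD i 0 ≤ x) →
    (∀ i, hi ≤ i → i < lib.length → x < lib.getD i 0) →
    pvUpper lib x lo hi = lib.countP (fun v => v ≤ x) := by
  have hmono : ∀ i j, i ≤ j → j < lib.length → lib.getD i 0 ≤ lib.getD j 0 := by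
    intro i j hij hj
    have hi : i < lib.length := lt_of_le_of_lt (Nat.lt_succ_iff.mp (Nat.lt_succ_of_le hij)) hj
    rw [List.getD_eq_getElem lib 0 hi, List.getD_eq_getElem lib 0 hj]
    rcases Nat.eq_or_lt_of_le hij with rfl | hlt
    · exact le_refl _
    · exact List.pairwise_iff_getElem.mp hs i j hi hj hlt
  intro fuel
  induction fuel with
  | zero =>
    intro lo hi hfuel hle hlen h1 h2
    have : lo = hi := by omega
    subst this
    rw [pvUpper, dif_neg (lt_irrefl lo)]
    exact (countP_eq_of_split lib x lo hlen h1 h2).symm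
  | succ n ih =>
    intro lo hi hfuel hle hlen h1 h2
    rw [pvUpper]
    by_cases hlt : lo < hi
    · simp only [hlt, dif_pos]
      set mid := (lo + hi) / 2 with hmid
      have hm1 : lo ≤ mid := by omega
      have hm2 : mid < hi := by omega
      by_cases hc : lib.getD mid 0 ≤ x
      · simp only [hc, if_pos]
        apply ih (mid + 1) hi (by omega) (by omega) hlen
        · intro i hi2
          rcases Nat.lt_or_ge i lo with h | h
          · exact h1 i h
          · exact le_trans (hmono i mid (by omega) (by omega)) hc
        · exact h2
      · simp only [hc, if_neg, not_false_iff]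
        apply ih lo mid (by omega) (by omega) (by omega) h1
        intro i hi2 hil
        exact lt_of_lt_of_le (lt_of_not_ge hc) (hmono mid i hi2 hil)
    · rw [dif_neg hlt]
      have heq : lo = hi := by omega
      subst heq
      exact (countP_eq_of_split lib x lo hlen h1 h2).symm

-- A's inner loop counts lib values above fq; linking it to B's  n - upper(fq).
lemma perQuery (lib : List Int) (fq : Int) :
    lib.foldl (fun acc l => if fq < l then acc + 1 else acc) (0 : Int) =
    ((PySem.List.sorted lib (fun v => v) false).length : Int) -
      (pvUpper (PySem.List.sorted lib (fun v => v) false) fq 0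
        (PySem.List.sorted lib (fun v => v) false).length : Int) := by
  set slib := PySem.List.sorted lib (fun v => v) false with hslib
  have hperm : slib.Perm lib := PySem.List.sorted_perm lib _ _
  have hpair : slib.Pairwise (· ≤ ·) := by
    simpa using PySem.List.sorted_pairwise lib (fun v => v)
  have hup : pvUpper slib fq 0 slib.length = slib.countP (fun v => v ≤ fq) :=
    pvUpper_eq slib fq hpair slib.length 0 slib.length (by omega) (by omega) (le_refl _)
      (by intro i h; omega) (by intro i h1 h2; omega)
  rw [PySem.List.foldl_ite_add_one (fun l => fq < l)]
  have hsplit : slib.countP (fun v => decide (v ≤ fq)) + slib.countP (fun v => decide (fq < v)) = slib.length := by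
    have h := List.length_eq_countP_add_countP (l := slib) (p := fun v => decide (v ≤ fq))
    have h2 : slib.countP (fun a => decide ¬(decide (a ≤ fq) = true)) = slib.countP (fun v => decide (fq < v)) := by
      apply List.countP_congr; intro a _; simp [not_le]
    omega
  have hcount : slib.countP (fun v => fq < v) = lib.countP (fun v => fq < v) :=
    hperm.countP_eq _
  rw [hup]
  omega

-- ===== VERDICT (by name: the statement is the Claim_ definition above) =====
theorem numSmallerByFrequency_spec : Claim_equal_numSmallerByFrequency := by
  intro queries words _dom _pre
  unfold Spec_numSmallerByFrequency numSmallerByFrequency numSmallerByFrequency_alt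
  simp only
  apply List.map_congr_left
  intro q _hq
  have hf : words.map pvFA = words.map pvFB := List.map_congr_left (fun w _ => pvFA_eq_pvFB w)
  rw [pvFA_eq_pvFB q, hf]
  exact perQuery (words.map pvFB) (pvFB q)
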